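-- pv_equiv track=rewrite | github.com/PostHog/posthog-foss | products/error_tracking/backend/presentation/git_provider_file_link_resolver.py | prepare_gitlab_search_query
-- ===== SOURCE A (Python) =====
-- def prepare_gitlab_search_query(q: str | None) -> str:
--     """Sanitize code sample for GitLab search by removing special characters."""
--     if not q:
--         return ""
--
--     result = []
--     for char in q:
--         if char in ".,:;/\\=*!?#$&+^|~<>(){}[]\"'`":
--             result.append(" ")
--         else:
--             result.append(char)
--
--     return " ".join("".join(result).split())
-- ===== SOURCE B (Python) =====
-- _SPECIALS = ".,:;/\\=*!?#$&+^|~<>(){}[]\"'`"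
--
--
-- def prepare_gitlab_search_query(q):
--     """Single-pass tokenizer: cut tokens directly at specials/whitespace instead of
--     substituting spaces and re-splitting."""
--     if not q:
--         return ""
--
--     tokens = []
--     cur = []
--     for ch in q:
--         if ch in _SPECIALS or ch.isspace():
--             if cur:
--                 tokens.append("".join(cur))
--                 cur = []
--         else:
--             cur.append(ch)
--     if cur:
--         tokens.append("".join(cur))
--
--     return " ".join(tokens)
-- ===== Notes on version B (the rewrite author's own statement) =====
-- stated objective: alternative
-- what changed: Replaced A's two-pass substitute-specials-with-spaces-then-split()-then-join with a single pass that cuts tokens directly at special/whitespace characters while accumulating them.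
import Mathlib
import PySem

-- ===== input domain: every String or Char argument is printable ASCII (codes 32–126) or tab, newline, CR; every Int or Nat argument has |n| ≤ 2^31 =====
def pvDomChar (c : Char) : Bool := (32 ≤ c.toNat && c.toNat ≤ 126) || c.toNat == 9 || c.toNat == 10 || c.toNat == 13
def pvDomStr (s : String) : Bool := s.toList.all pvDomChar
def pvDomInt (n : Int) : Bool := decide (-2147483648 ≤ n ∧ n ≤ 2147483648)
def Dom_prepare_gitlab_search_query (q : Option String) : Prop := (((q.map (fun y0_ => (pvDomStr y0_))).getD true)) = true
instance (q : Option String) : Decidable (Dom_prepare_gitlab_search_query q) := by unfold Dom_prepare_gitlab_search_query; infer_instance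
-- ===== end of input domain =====

-- B replaces A's substitute-then-split()-then-join two-pass pipeline with a single
-- tokenizing pass that cuts tokens directly at special/whitespace characters (alternative, same cost).


-- ===== PORT A =====
-- the special-character string of A
def pvSpecialsA : List Char := ".,:;/\\=*!?#$&+^|~<>(){}[]\"'`".toList

-- A: 'if not q: return ""'; else map each special char to ' ' (building `result` by appends),
-- then '" ".join("".join(result).split())'.
def prepare_gitlab_search_query (q : Option String) : String :=
  match q with
  | none => ""
  | some s =>
    if s.toList = [] then ""
    else
      let result : List Char :=
        s.toList.foldl (fun acc c => acc ++ [if pvSpecialsA.contains c then ' ' else c]) []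
      String.mk (PySem.Chars.join " ".toList (PySem.Chars.split₀ result))

-- ===== PORT B =====
-- B's module constant _SPECIALS; single-char 'ch in _SPECIALS' is exactly List.contains
def pvSpecialsB : List Char := ".,:;/\\=*!?#$&+^|~<>(){}[]\"'`".toList

-- B: one pass holding (tokens, cur); a special/whitespace char flushes cur (if nonempty),
-- any other char is appended to cur; final flush, then '" ".join(tokens)'.
def prepare_gitlab_search_query_alt (q : Option String) : String :=
  match q with
  | none => ""
  | some s =>
    if s.toList = [] then ""
    else
      let p : List (List Char) × List Char :=
        s.toList.foldl
          (fun (st : List (List Char) × List Char) ch =>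
            if pvSpecialsB.contains ch || PySem.Chars.isspace ch then
              (if st.2.isEmpty then st else (st.1 ++ [st.2], []))
            else (st.1, st.2 ++ [ch])) ([], [])
      String.mk (PySem.Chars.join " ".toList
        (if p.2.isEmpty then p.1 else p.1 ++ [p.2]))

-- ===== PRECONDITION & SPEC =====
def Spec_prepare_gitlab_search_query (q : Option String) (out : String) : Prop := out = prepare_gitlab_search_query_alt q
instance (q : Option String) (out : String) : Decidable (Spec_prepare_gitlab_search_query q out) := by unfold Spec_prepare_gitlab_search_query; infer_instance

-- ===== CLAIM (what is proved, stated in full; the proofs are below) =====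
def Claim_equal_prepare_gitlab_search_query : Prop := ∀ (q : Option String), Dom_prepare_gitlab_search_query q → Spec_prepare_gitlab_search_query q (prepare_gitlab_search_query q)

-- ===== LEMMAS AND PROOFS =====

-- A's substitution, named
def pvF (c : Char) : Char := if pvSpecialsA.contains c then ' ' else c

-- B's step function, named (the port inlines this exact term)
def pvStepB (st : List (List Char) × List Char) (ch : Char) : List (List Char) × List Char :=
  if pvSpecialsB.contains ch || PySem.Chars.isspace ch then
    (if st.2.isEmpty then st else (st.1 ++ [st.2], []))
  else (st.1, st.2 ++ [ch])

theorem pv_contains_AB (c : Char) : pvSpecialsA.contains c = pvSpecialsB.contains c := rfl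

-- A's append-loop builds the mapped list
theorem pv_foldl_append_map (f : Char → Char) :
    ∀ (l acc : List Char),
      l.foldl (fun a c => a ++ [f c]) acc = acc ++ l.map f := by
  intro l
  induction l with
  | nil => intro acc; simp
  | cons c t ih => intro acc; simp [List.foldl, ih]

theorem pv_stepB_delim_nil (ts : List (List Char)) (c : Char)
    (hd : (pvSpecialsB.contains c || PySem.Chars.isspace c) = true) :
    pvStepB (ts, []) c = (ts, []) := by
  unfold pvStepB; rw [if_pos hd]; rfl

theorem pv_stepB_delim_cons (ts : List (List Char)) (cu : List Char) (c : Char)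
    (hd : (pvSpecialsB.contains c || PySem.Chars.isspace c) = true) (h2 : cu ≠ []) :
    pvStepB (ts, cu) c = (ts ++ [cu], []) := by
  unfold pvStepB
  rw [if_pos hd, if_neg (by simpa [List.isEmpty_iff] using h2)]

theorem pv_stepB_nondelim (ts : List (List Char)) (cu : List Char) (c : Char)
    (hd : (pvSpecialsB.contains c || PySem.Chars.isspace c) = false) :
    pvStepB (ts, cu) c = (ts, cu ++ [c]) := by
  unfold pvStepB
  rw [if_neg (by rw [hd]; exact Bool.false_ne_true)]

theorem pv_isspace_f_of_delim (c : Char)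
    (hd : (pvSpecialsB.contains c || PySem.Chars.isspace c) = true) :
    PySem.Chars.isspace (pvF c) = true := by
  unfold pvF
  cases h1 : pvSpecialsA.contains c with
  | false =>
    rw [if_neg Bool.false_ne_true]
    rw [← pv_contains_AB, h1, Bool.false_or] at hd
    exact hd
  | true => rw [if_pos rfl]; decide

theorem pv_f_of_nondelim (c : Char)
    (hd : (pvSpecialsB.contains c || PySem.Chars.isspace c) = false) :
    pvF c = c ∧ PySem.Chars.isspace c = false := by
  rcases Bool.or_eq_false_iff.mp hd with ⟨h1, h2⟩
  refine ⟨?_, h2⟩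
  unfold pvF
  rw [if_neg (by rw [pv_contains_AB, h1]; exact Bool.false_ne_true)]

-- core: split₀.go on the substituted list computes B's single-pass tokenization
theorem pv_go_tokens :
    ∀ (rest cur : List Char) (acc : List (List Char)),
      PySem.Chars.split₀.go (rest.map pvF) cur acc =
        (if (rest.foldl pvStepB (acc.reverse, cur.reverse)).2.isEmpty then
            (rest.foldl pvStepB (acc.reverse, cur.reverse)).1
          else
            (rest.foldl pvStepB (acc.reverse, cur.reverse)).1 ++
              [(rest.foldl pvStepB (acc.reverse, cur.reverse)).2]) := by
  intro rest
  induction rest with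
  | nil =>
    intro cur acc
    simp only [List.map_nil, List.foldl_nil, PySem.Chars.split₀.go]
    rcases cur with _ | ⟨d, ds⟩ <;> simp
  | cons c t ih =>
    intro cur acc
    simp only [List.map_cons, List.foldl_cons, PySem.Chars.split₀.go]
    cases hd : (pvSpecialsB.contains c || PySem.Chars.isspace c) with
    | false =>
      obtain ⟨hf, hsp⟩ := pv_f_of_nondelim c hd
      rw [hf, if_neg (by rw [hsp]; exact Bool.false_ne_true), pv_stepB_nondelim _ _ _ hd]
      have := ih (c :: cur) acc
      simpa [List.reverse_cons] using this
    | true =>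
      rw [if_pos (pv_isspace_f_of_delim c hd)]
      rcases cur with _ | ⟨d, ds⟩
      · rw [if_pos (by rfl)]
        simp only [List.reverse_nil]
        rw [pv_stepB_delim_nil _ _ hd]
        simpa using ih [] acc
      · rw [if_neg (by simp)]
        rw [pv_stepB_delim_cons _ _ _ hd (by simp)]
        have := ih [] ((d :: ds).reverse :: acc)
        simpa [List.reverse_cons] using this

theorem pv_body_eq (cs : List Char) :
    PySem.Chars.split₀ (cs.map pvF) =
      (if (cs.foldl pvStepB ([], [])).2.isEmpty then (cs.foldl pvStepB ([], [])).1
        else (cs.foldl pvStepB ([], [])).1 ++ [(cs.foldl pvStepB ([], [])).2]) := by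
  have := pv_go_tokens cs [] []
  simpa [PySem.Chars.split₀] using this

-- ===== VERDICT (by name: the statement is the Claim_ definition above) =====
theorem prepare_gitlab_search_query_spec : Claim_equal_prepare_gitlab_search_query := by
  intro q _
  unfold Spec_prepare_gitlab_search_query
  match q with
  | none => rfl
  | some s =>
    simp only [prepare_gitlab_search_query, prepare_gitlab_search_query_alt]
    by_cases h : s.toList = []
    · simp [h]
    · rw [if_neg h, if_neg h]
      rw [show (fun (acc : List Char) c => acc ++ [if pvSpecialsA.contains c then ' ' else c])
            = (fun (a : List Char) c => a ++ [pvF c]) from rfl]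
      rw [show (fun (st : List (List Char) × List Char) ch =>
              if pvSpecialsB.contains ch || PySem.Chars.isspace ch then
                (if st.2.isEmpty then st else (st.1 ++ [st.2], []))
              else (st.1, st.2 ++ [ch])) = pvStepB from rfl]
      rw [pv_foldl_append_map pvF s.toList [], List.nil_append, pv_body_eq]
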